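-- pv_equiv track=rewrite | github.com/HengLine/video-shot-agent | hengline/agent/script_parser/script_extractor/script_action_extractor.py | _assess_intensity
-- ===== SOURCE A (Python) =====
-- def _assess_intensity(text: str) -> int:
--     """评估动作强度"""
--     text_lower = text.lower()
--
--     intensity_keywords = {
--         1: ["slowly", "gently", "softly", "轻轻地", "慢慢地"],
--         2: ["normally", "usually", "一般", "正常"],
--         3: ["quickly", "firmly", "decidedly", "快速地", "坚决地"],
--         4: ["forcefully", "angrily", "violently", "用力地", "愤怒地"],
--         5: ["frantically", "desperately", "wildly", "疯狂地", "拼命地"]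
--     }
--
--     for intensity, keywords in intensity_keywords.items():
--         for keyword in keywords:
--             if keyword in text_lower:
--                 return intensity
--
--     return 2  # 默认中等强度
-- ===== SOURCE B (Python) =====
-- _INTENSITY_OF = {
--     "slowly": 1, "gently": 1, "softly": 1, "轻轻地": 1, "慢慢地": 1,
--     "normally": 2, "usually": 2, "一般": 2, "正常": 2,
--     "quickly": 3, "firmly": 3, "decidedly": 3, "快速地": 3, "坚决地": 3,
--     "forcefully": 4, "angrily": 4, "violently": 4, "用力地": 4, "愤怒地": 4,
--     "frantically": 5, "desperately": 5, "wildly": 5, "疯狂地": 5, "拼命地": 5,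
-- }
--
--
-- def _assess_intensity(text: str) -> int:
--     """评估动作强度"""
--     text_lower = text.lower()
--     matched = [level for keyword, level in _INTENSITY_OF.items() if keyword in text_lower]
--     return min(matched, default=2)
-- ===== Notes on version B (the rewrite author's own statement) =====
-- stated objective: idiomatic
-- what changed: B replaces the level-grouped dict and double loop with early return by one flat keyword-to-level mapping scanned once, collecting all matched levels and returning min(matched, default=2); this equals A's first match because A scans levels in ascending order.
import Mathlib
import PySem

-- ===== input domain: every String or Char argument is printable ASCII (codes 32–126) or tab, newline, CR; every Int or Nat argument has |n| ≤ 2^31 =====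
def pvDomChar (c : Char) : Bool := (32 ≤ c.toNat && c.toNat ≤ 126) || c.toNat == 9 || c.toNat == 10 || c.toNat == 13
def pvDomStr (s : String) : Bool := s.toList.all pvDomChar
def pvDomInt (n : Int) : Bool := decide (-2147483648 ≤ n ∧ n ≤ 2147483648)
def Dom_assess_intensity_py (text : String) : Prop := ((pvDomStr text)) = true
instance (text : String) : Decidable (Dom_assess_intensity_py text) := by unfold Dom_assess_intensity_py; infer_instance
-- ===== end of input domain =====

-- B replaces A's level-grouped dict with double loop and early return by one flat
-- keyword→level mapping scanned once, returning min(matched levels, default=2); idiomatic, same cost.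

-- ===== PORT A =====
-- A's intensity_keywords dict: levels in insertion order 1..5, each with its keyword list.
def pvLevelsA : List (Int × List String) :=
  [ (1, ["slowly", "gently", "softly", "轻轻地", "慢慢地"]),
    (2, ["normally", "usually", "一般", "正常"]),
    (3, ["quickly", "firmly", "decidedly", "快速地", "坚决地"]),
    (4, ["forcefully", "angrily", "violently", "用力地", "愤怒地"]),
    (5, ["frantically", "desperately", "wildly", "疯狂地", "拼命地"]) ]

-- A's nested for-loops with early return: first level one of whose keywords occurs in text_lower.
def pvScanA (tl : String) : List (Int × List String) → Int
  | [] => 2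
  | (i, kws) :: rest =>
      if kws.any (fun k => PySem.Str.isIn k tl) then i else pvScanA tl rest

def assess_intensity_py (text : String) : Int :=
  pvScanA (PySem.Str.lower text) pvLevelsA

-- ===== PORT B =====
-- B's flat _INTENSITY_OF dict, in insertion order.
def pvIntensityOf : List (String × Int) :=
  [ ("slowly", 1), ("gently", 1), ("softly", 1), ("轻轻地", 1), ("慢慢地", 1),
    ("normally", 2), ("usually", 2), ("一般", 2), ("正常", 2),
    ("quickly", 3), ("firmly", 3), ("decidedly", 3), ("快速地", 3), ("坚决地", 3),
    ("forcefully", 4), ("angrily", 4), ("violently", 4), ("用力地", 4), ("愤怒地", 4),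
    ("frantically", 5), ("desperately", 5), ("wildly", 5), ("疯狂地", 5), ("拼命地", 5) ]

def assess_intensity_py_alt (text : String) : Int :=
  let tl := PySem.Str.lower text
  let matched := pvIntensityOf.filterMap
    (fun p => if PySem.Str.isIn p.1 tl then some p.2 else none)
  PySem.List.minD matched (fun x => x) 2

-- ===== PRECONDITION & SPEC =====
def Spec_assess_intensity_py (text : String) (out : Int) : Prop := out = assess_intensity_py_alt text
instance (text : String) (out : Int) : Decidable (Spec_assess_intensity_py text out) := by unfold Spec_assess_intensity_py; infer_instance

-- ===== CLAIM (what is proved, stated in full; the proofs are below) =====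
def Claim_equal_assess_intensity_py : Prop := ∀ (text : String), Dom_assess_intensity_py text → Spec_assess_intensity_py text (assess_intensity_py text)

-- ===== LEMMAS AND PROOFS =====

-- The flat keyword→level list of one level group.
def pvSeg (tl : String) (g : Int × List String) : List Int :=
  (g.2.map (fun k => (k, g.1))).filterMap
    (fun p => if PySem.Str.isIn p.1 tl then some p.2 else none)

theorem pvSeg_mem {tl : String} {g : Int × List String} {x : Int}
    (hx : x ∈ pvSeg tl g) : x = g.1 := by
  simp only [pvSeg, List.mem_filterMap, List.mem_map] at hx
  obtain ⟨p, ⟨k, _, rfl⟩, hp⟩ := hx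
  by_cases h : PySem.Str.isIn k tl = true
  · rw [if_pos h] at hp
    exact (Option.some_inj.mp hp).symm
  · rw [if_neg h] at hp
    exact absurd hp (by simp)

theorem pvSeg_eq_nil {tl : String} {g : Int × List String}
    (h : g.2.any (fun k => PySem.Str.isIn k tl) = false) : pvSeg tl g = [] := by
  simp only [List.any_eq_false] at h
  simp only [pvSeg, List.filterMap_eq_nil_iff, List.mem_map]
  rintro p ⟨k, hk, rfl⟩
  exact if_neg (h k hk)

theorem pvSeg_head_mem {tl : String} {g : Int × List String}
    (h : g.2.any (fun k => PySem.Str.isIn k tl) = true) : g.1 ∈ pvSeg tl g := by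
  simp only [List.any_eq_true] at h
  obtain ⟨k, hk, hin⟩ := h
  simp only [pvSeg, List.mem_filterMap, List.mem_map]
  exact ⟨(k, g.1), ⟨k, hk, rfl⟩, by rw [if_pos hin]⟩

-- Membership in the flat matched list of a group list: the value is a level of some group.
theorem pvFlat_mem {tl : String} {gs : List (Int × List String)} {x : Int}
    (hx : x ∈ (gs.flatMap (fun g => pvSeg tl g))) : ∃ g ∈ gs, x = g.1 := by
  simp only [List.mem_flatMap] at hx
  obtain ⟨g, hg, hxg⟩ := hx
  exact ⟨g, hg, pvSeg_mem hxg⟩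

-- Main invariant: A's grouped early-return scan equals min-with-default over the flat matched list,
-- provided the groups come in strictly ascending level order.
theorem pvScan_eq_minD (tl : String) (gs : List (Int × List String))
    (hs : gs.Pairwise (fun a b => a.1 < b.1)) :
    pvScanA tl gs =
      PySem.List.minD (gs.flatMap (fun g => pvSeg tl g)) (fun x => x) 2 := by
  induction gs with
  | nil => simp [pvScanA, PySem.List.minD, PySem.List.min?]
  | cons g rest ih =>
    rcases List.pairwise_cons.mp hs with ⟨hlt, hrest⟩
    by_cases h : g.2.any (fun k => PySem.Str.isIn k tl) = true
    · -- A returns g.1; the flat list contains g.1 and everything else is ≥ g.1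
      have hmem : g.1 ∈ (g :: rest).flatMap (fun g' => pvSeg tl g') := by
        simp only [List.flatMap_cons, List.mem_append]
        exact Or.inl (pvSeg_head_mem h)
      have hne : (g :: rest).flatMap (fun g' => pvSeg tl g') ≠ [] := by
        intro hnil; rw [hnil] at hmem; exact absurd hmem (List.not_mem_nil)
      obtain ⟨m, hm⟩ : ∃ m, PySem.List.min? ((g :: rest).flatMap (fun g' => pvSeg tl g'))
          (fun x => x) = some m := by
        cases hmin : PySem.List.min? ((g :: rest).flatMap (fun g' => pvSeg tl g'))
            (fun x => x) with
        | none => exact absurd ((PySem.List.min?_eq_none_iff _ _).mp hmin) hne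
        | some m => exact ⟨m, rfl⟩
      have hmle : m ≤ g.1 := PySem.List.min?_isMin hm g.1 hmem
      have hmmem : m ∈ (g :: rest).flatMap (fun g' => pvSeg tl g') :=
        PySem.List.min?_mem hm
      have hmeq : m = g.1 := by
        rcases pvFlat_mem hmmem with ⟨g', hg', rfl⟩
        rcases List.mem_cons.mp hg' with rfl | hg'r
        · rfl
        · exact absurd (hlt g' hg'r) (by omega)
      simp only [pvScanA, h, if_true, PySem.List.minD, hm, Option.getD_some, hmeq]
    · -- this group contributes nothing; recurse
      have h' : g.2.any (fun k => PySem.Str.isIn k tl) = false := by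
        simpa using h
      simp only [pvScanA, h', if_false, List.flatMap_cons, pvSeg_eq_nil h',
        List.nil_append, Bool.false_eq_true]
      exact ih hrest

-- B's flat dict is exactly the flattening of A's grouped dict.
theorem pvIntensityOf_eq :
    pvIntensityOf = pvLevelsA.flatMap (fun g => g.2.map (fun k => (k, g.1))) := by
  decide

theorem pvLevelsA_sorted : pvLevelsA.Pairwise (fun a b => a.1 < b.1) := by
  decide

-- ===== VERDICT (by name: the statement is the Claim_ definition above) =====
theorem assess_intensity_py_spec : Claim_equal_assess_intensity_py := by
  intro text _
  unfold Spec_assess_intensity_py assess_intensity_py assess_intensity_py_alt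
  simp only [pvIntensityOf_eq, List.filterMap_flatMap]
  exact pvScan_eq_minD (PySem.Str.lower text) pvLevelsA pvLevelsA_sorted
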